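-- pv_equiv track=rewrite | github.com/athrael-soju/Snappy | backend/domain/maintenance.py | summarize_status
-- ===== SOURCE A (Python) =====
-- def summarize_status(results: dict) -> str:
--     statuses = [entry.get("status") for entry in results.values()]
--     success_like = {"success", "skipped"}
--
--     if all(status in success_like for status in statuses):
--         return "success"
--     if any(status == "success" for status in statuses):
--         return "partial"
--     return "error"
-- ===== SOURCE B (Python) =====
-- def summarize_status(results: dict) -> str:
--     all_ok = True
--     has_success = False
--     for entry in results.values():
--         status = entry.get("status")
--         if status == "success":
--             has_success = True
--         elif status != "skipped":
--             all_ok = False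
--     if all_ok:
--         return "success"
--     if has_success:
--         return "partial"
--     return "error"
-- ===== Notes on version B (the rewrite author's own statement) =====
-- stated objective: alternative
-- what changed: Replaces the intermediate statuses list plus two separate short-circuiting all/any scans with a single explicit loop over results.values() maintaining two booleans (all_ok, has_success), then a three-way branch.
import Mathlib
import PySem

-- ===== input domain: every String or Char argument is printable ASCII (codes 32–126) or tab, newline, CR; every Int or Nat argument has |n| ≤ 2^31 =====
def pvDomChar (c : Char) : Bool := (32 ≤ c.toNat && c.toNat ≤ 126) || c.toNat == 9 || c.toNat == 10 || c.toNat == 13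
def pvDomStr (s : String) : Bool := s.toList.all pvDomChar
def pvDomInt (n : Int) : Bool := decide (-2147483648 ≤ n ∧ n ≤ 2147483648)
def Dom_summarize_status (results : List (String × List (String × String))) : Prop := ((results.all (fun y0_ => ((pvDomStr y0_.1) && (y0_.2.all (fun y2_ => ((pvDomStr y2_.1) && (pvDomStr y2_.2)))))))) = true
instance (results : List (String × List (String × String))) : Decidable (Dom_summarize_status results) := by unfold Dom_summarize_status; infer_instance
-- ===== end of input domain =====

-- B replaces A's statuses list plus two separate all/any scans by one loop keeping two booleans (objective: alternative, same cost).

-- ===== PORT A =====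
-- Literal port of A: build the statuses list, then 'all'/'any' scans over it.
def summarize_status (results : List (String × List (String × String))) : String :=
  let statuses := (results.map Prod.snd).map (fun entry => (PySem.Dict.mk entry).get? "status")
  if statuses.all (fun s => s == some "success" || s == some "skipped") then "success"
  else if statuses.any (fun s => s == some "success") then "partial"
  else "error"

-- ===== PORT B =====
-- B: single left fold over the entries maintaining (all_ok, has_success), then a three-way branch.
def summarize_status_alt (results : List (String × List (String × String))) : String :=
  let st := results.foldl (fun (acc : Bool × Bool) kv =>
    let status := (PySem.Dict.mk kv.2).get? "status"
    if status == some "success" then (acc.1, true)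
    else if status != some "skipped" then (false, acc.2)
    else acc) (true, false)
  if st.1 then "success"
  else if st.2 then "partial"
  else "error"

-- ===== PRECONDITION & SPEC =====
def Spec_summarize_status (results : List (String × List (String × String))) (out : String) : Prop := out = summarize_status_alt results
instance (results : List (String × List (String × String))) (out : String) : Decidable (Spec_summarize_status results out) := by unfold Spec_summarize_status; infer_instance

-- ===== CLAIM (what is proved, stated in full; the proofs are below) =====
def Claim_equal_summarize_status : Prop := ∀ (results : List (String × List (String × String))), Dom_summarize_status results → Spec_summarize_status results (summarize_status results)

-- ===== LEMMAS AND PROOFS =====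

-- ===== VERDICT (by name: the statement is the Claim_ definition above) =====
-- The fold's pair of flags equals (a && all success-like, h || any success) — proved by induction.
theorem pv_fold_flags (l : List (String × List (String × String))) (a h : Bool) :
    l.foldl (fun (acc : Bool × Bool) kv =>
      let status := (PySem.Dict.mk kv.2).get? "status"
      if status == some "success" then (acc.1, true)
      else if status != some "skipped" then (false, acc.2)
      else acc) (a, h)
    = (a && l.all (fun kv => ((PySem.Dict.mk kv.2).get? "status" == some "success"
            || (PySem.Dict.mk kv.2).get? "status" == some "skipped")),
       h || l.any (fun kv => (PySem.Dict.mk kv.2).get? "status" == some "success")) := by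
  induction l generalizing a h with
  | nil => simp
  | cons x xs ih =>
    simp only [List.foldl_cons, List.all_cons, List.any_cons]
    by_cases hs : (PySem.Dict.mk x.2).get? "status" == some "success"
    · rw [if_pos hs, ih]
      simp [hs]
    · by_cases hk : (PySem.Dict.mk x.2).get? "status" == some "skipped"
      · have h1 : ((PySem.Dict.mk x.2).get? "status" != some "skipped") = false := by
          simp only [bne, hk, Bool.not_true]
        rw [if_neg hs, h1, if_neg Bool.false_ne_true, ih]
        simp [hs, hk]
      · have h1 : ((PySem.Dict.mk x.2).get? "status" != some "skipped") = true := by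
          simp only [bne, Bool.not_eq_true']
          exact (Bool.not_eq_true _) ▸ hk
        rw [if_neg hs, h1, if_pos rfl, ih]
        simp [hs, hk]

theorem summarize_status_spec : Claim_equal_summarize_status := by
  intro results _
  unfold Spec_summarize_status summarize_status summarize_status_alt
  rw [pv_fold_flags]
  simp only [List.map_map, List.all_map, List.any_map, Function.comp_def, Bool.true_and, Bool.false_or]
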